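-- pv_equiv track=rewrite | github.com/UPB-SysSec/3MF-Analyzer | src/3mf-analyzer/gather/utils.py | inline_blockquote
-- ===== SOURCE A (Python) =====
-- def inline_blockquote(text: str):
--     """Converts a markdown blockquote string to an inline quote:
--
--     > abc     gets     "abc def"
--     > def
--     """
--     result = []
--     bq_started = False
--     for line, next_line in zip(text.split("\n"), text.split("\n")[1:] + [""]):
--         if line.strip().startswith("> "):
--             if not bq_started:
--                 line = '"' + line[2:]
--                 bq_started = True
--             else:
--                 line = line[2:]
--             if not next_line.strip().startswith("> "):
--                 line += '"'
--                 bq_started = False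
--         result.append(line)
--     return "\n".join(result)
-- ===== SOURCE B (Python) =====
-- def inline_blockquote(text: str):
--     """Converts a markdown blockquote string to an inline quote.
--
--     Run-based: splits the lines into maximal runs of blockquote lines and
--     rewrites each run as one unit (unprefix all lines, quote the first and
--     last line of the run), instead of a per-line pass carrying state.
--     """
--
--     def is_bq(line):
--         return line.strip().startswith("> ")
--
--     lines = text.split("\n")
--     out = []
--     i = 0
--     while i < len(lines):
--         if not is_bq(lines[i]):
--             out.append(lines[i])
--             i += 1
--         else:
--             k = i + 1
--             while k < len(lines) and is_bq(lines[k]):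
--                 k += 1
--             run = [l[2:] for l in lines[i:k]]
--             run[0] = '"' + run[0]
--             run[-1] = run[-1] + '"'
--             out.extend(run)
--             i = k
--     return "\n".join(out)
-- ===== Notes on version B (the rewrite author's own statement) =====
-- stated objective: alternative
-- what changed: Replaces A's single forward pass with a mutable bq_started run flag and zip-with-successor by run extraction: the line list is decomposed into maximal runs of blockquote lines (inner scan finds each run's end), and each run is rewritten as one unit (strip the prefix of every line, quote the first and last line of the run).
import Mathlib
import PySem

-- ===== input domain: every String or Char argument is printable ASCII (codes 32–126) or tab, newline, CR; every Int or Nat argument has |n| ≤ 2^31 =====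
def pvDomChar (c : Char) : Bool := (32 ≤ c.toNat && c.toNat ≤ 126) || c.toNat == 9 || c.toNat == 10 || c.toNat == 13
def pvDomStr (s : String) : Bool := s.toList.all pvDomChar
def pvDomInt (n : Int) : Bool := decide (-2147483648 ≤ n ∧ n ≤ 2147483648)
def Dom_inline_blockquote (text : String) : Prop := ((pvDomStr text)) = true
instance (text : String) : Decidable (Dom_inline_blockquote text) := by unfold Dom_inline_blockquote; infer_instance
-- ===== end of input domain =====

-- B replaces A's flag-carrying forward pass by a run-based recursion that
-- rewrites each maximal blockquote run as one unit (objective: alternative).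


-- ===== PORT A =====
-- A's loop over zip(lines, lines[1:] + [""]) carrying the bq_started flag.
def goA : List (String × String) → Bool → List String
  | [], _ => []
  | (line, next_line) :: rest, bq_started =>
    if PySem.Str.startswith (PySem.Str.strip line) "> " then
      let line1 := if !bq_started then "\"" ++ PySem.Str.slice line (some 2) none
                   else PySem.Str.slice line (some 2) none
      if !(PySem.Str.startswith (PySem.Str.strip next_line) "> ") then
        (line1 ++ "\"") :: goA rest false
      else
        line1 :: goA rest true
    else
      line :: goA rest bq_started

-- text.split("\n"): sep ≠ "" so Str.split? is always some; getD only discharges the option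
def pyLines (text : String) : List String := (PySem.Str.split? text "\n").getD []

def inline_blockquote (text : String) : String :=
  PySem.Str.join "\n" (goA ((pyLines text).zip ((pyLines text).tail ++ [""])) false)

-- ===== PORT B =====
-- is_bq(line)
def isBq (l : String) : Bool := PySem.Str.startswith (PySem.Str.strip l) "> "

-- run[0] = '"' + run[0]
def quoteFirst : List String → List String
  | [] => []
  | h :: t => ("\"" ++ h) :: t

-- run[-1] = run[-1] + '"'
def quoteLast : List String → List String
  | [] => []
  | [h] => [h ++ "\""]
  | h :: t => h :: quoteLast t

-- B's go(lines): maximal bq-run extraction (the while loop over k is the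
-- takeWhile/dropWhile split of the list at the end of the run).
def goB : List String → List String
  | [] => []
  | l :: t =>
    if h : isBq l then
      quoteLast (quoteFirst (((l :: t).takeWhile isBq).map (fun s => PySem.Str.slice s (some 2) none)))
        ++ goB ((l :: t).dropWhile isBq)
    else
      l :: goB t
  termination_by ls => ls.length
  decreasing_by
  · rw [List.dropWhile_cons_of_pos h]
    exact Nat.lt_succ_of_le (List.length_dropWhile_le isBq t)
  · simp

def inline_blockquote_alt (text : String) : String :=
  PySem.Str.join "\n" (goB (pyLines text))

-- ===== PRECONDITION & SPEC =====
def Spec_inline_blockquote (text : String) (out : String) : Prop := out = inline_blockquote_alt text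
instance (text : String) (out : String) : Decidable (Spec_inline_blockquote text out) := by unfold Spec_inline_blockquote; infer_instance

-- ===== CLAIM (what is proved, stated in full; the proofs are below) =====
def Claim_equal_inline_blockquote : Prop := ∀ (text : String), Dom_inline_blockquote text → Spec_inline_blockquote text (inline_blockquote text)

-- ===== LEMMAS AND PROOFS =====

lemma isBq_empty : isBq "" = false := by decide

-- goA on a cons, with the blockquote test folded into isBq
lemma goA_cons (l nx : String) (rest : List (String × String)) (bq : Bool) :
    goA ((l, nx) :: rest) bq =
      if isBq l then
        (if !(isBq nx) then
          ((if !bq then "\"" ++ PySem.Str.slice l (some 2) none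
            else PySem.Str.slice l (some 2) none) ++ "\"") :: goA rest false
         else
          (if !bq then "\"" ++ PySem.Str.slice l (some 2) none
           else PySem.Str.slice l (some 2) none) :: goA rest true)
      else l :: goA rest bq := rfl

lemma zip_next_cons (l : String) (t : List String) :
    (l :: t).zip (t ++ [""]) = (l, t.headD "") :: t.zip (t.tail ++ [""]) := by
  cases t <;> simp

lemma isBq_headD_dropWhile (ls : List String) :
    isBq ((ls.dropWhile isBq).headD "") = false := by
  induction ls with
  | nil => exact isBq_empty
  | cons l t ih =>
    rw [List.dropWhile_cons]
    by_cases h : isBq l = true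
    · rw [if_pos h]; exact ih
    · rw [if_neg h, List.headD_cons]
      simpa using h

lemma headD_takeWhile_nil (t : List String) (htk : t.takeWhile isBq = []) :
    isBq (t.headD "") = false := by
  cases t with
  | nil => exact isBq_empty
  | cons b t' =>
    rw [List.takeWhile_cons] at htk
    by_cases hb : isBq b = true
    · rw [if_pos hb] at htk; simp at htk
    · rw [List.headD_cons]; simpa using hb

lemma headD_takeWhile_cons (t b : String) (ls r' : List String)
    (htk : ls.takeWhile isBq = b :: r') : ls.headD t = b := by
  cases ls with
  | nil => simp at htk
  | cons c t' =>
    rw [List.takeWhile_cons] at htk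
    by_cases hc : isBq c = true
    · rw [if_pos hc] at htk
      simp at htk
      simp [htk.1]
    · rw [if_neg hc] at htk; simp at htk

lemma mem_takeWhile_isBq (x : String) (ls : List String)
    (hx : x ∈ ls.takeWhile isBq) : isBq x = true := by
  induction ls with
  | nil => simp at hx
  | cons c t' ih =>
    rw [List.takeWhile_cons] at hx
    by_cases hc : isBq c = true
    · rw [if_pos hc] at hx
      rcases List.mem_cons.mp hx with h | h
      · rwa [h]
      · exact ih h
    · rw [if_neg hc] at hx; simp at hx

-- A inside a blockquote run (flag = true): emits the sliced lines, quoting the last.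
lemma goA_run (a : String) (r rest : List String)
    (hr : ∀ l ∈ a :: r, isBq l = true) (hrest : isBq (rest.headD "") = false) :
    goA (((a :: r) ++ rest).zip (((a :: r) ++ rest).tail ++ [""])) true =
      quoteLast ((a :: r).map (fun s => PySem.Str.slice s (some 2) none)) ++
        goA (rest.zip (rest.tail ++ [""])) false := by
  induction r generalizing a with
  | nil =>
    have ha : isBq a = true := hr a (by simp)
    rw [List.cons_append, List.nil_append, List.tail_cons, zip_next_cons, goA_cons,
      if_pos ha, hrest]
    simp [quoteLast]
  | cons b r' ih =>
    have ha : isBq a = true := hr a (by simp)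
    have hb : isBq b = true := hr b (by simp)
    rw [List.cons_append, List.tail_cons, zip_next_cons, goA_cons, if_pos ha]
    have hhead : ((b :: r') ++ rest).headD "" = b := by simp
    rw [hhead, hb]
    simp only [Bool.not_true, Bool.false_eq_true, if_false]
    rw [ih b (fun l hl => hr l (List.mem_cons_of_mem a hl))]
    simp [quoteLast]

-- Main: A's flag pass with flag = false equals B's run recursion.
lemma goA_eq_goB (ls : List String) :
    goA (ls.zip (ls.tail ++ [""])) false = goB ls := by
  induction ls using goB.induct with
  | case1 => simp [goA, goB]
  | case2 l t hl ih =>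
    rw [goB, dif_pos hl, List.tail_cons, zip_next_cons, goA_cons, if_pos hl]
    simp only [Bool.not_false, if_true]
    rw [List.dropWhile_cons, if_pos hl] at ih ⊢
    rw [List.takeWhile_cons, if_pos hl]
    cases htk : t.takeWhile isBq with
    | nil =>
      have hth : isBq (t.headD "") = false := headD_takeWhile_nil t htk
      have hrest : t.dropWhile isBq = t := by
        cases t with
        | nil => simp
        | cons b t' =>
          rw [List.dropWhile_cons, if_neg (by simpa using hth)]
      rw [hth]
      simp only [Bool.not_false, if_true]
      rw [hrest] at ih ⊢
      rw [← ih]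
      simp [quoteFirst, quoteLast]
    | cons b r' =>
      have hb : isBq b = true := mem_takeWhile_isBq b t (by rw [htk]; simp)
      rw [headD_takeWhile_cons "" b t r' htk, hb]
      simp only [Bool.not_true, Bool.false_eq_true, if_false]
      have ht' : t = (b :: r') ++ t.dropWhile isBq := by
        conv_lhs => rw [← List.takeWhile_append_dropWhile (p := isBq) (l := t)]
        rw [htk]
      conv_lhs => rw [ht']
      rw [goA_run b r' (t.dropWhile isBq)
        (fun x hx => mem_takeWhile_isBq x t (htk ▸ hx)) (isBq_headD_dropWhile t), ih]
      simp [quoteFirst, quoteLast]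
  | case3 l t hl ih =>
    rw [goB, dif_neg hl, List.tail_cons, zip_next_cons, goA_cons, if_neg hl, ih]

-- ===== VERDICT (by name: the statement is the Claim_ definition above) =====
theorem inline_blockquote_spec : Claim_equal_inline_blockquote := by
  intro text _
  unfold Spec_inline_blockquote inline_blockquote inline_blockquote_alt
  rw [goA_eq_goB]
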